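-- pv_equiv track=rewrite | github.com/ChevkinKD/OS_labs | Lab6/main.py | remove_median_from_array
-- ===== SOURCE A (Python) =====
-- def find_median_value_from_array(arr):
--     n = len(arr)
--     if n == 0:
--         return None
--     tmp = sorted(arr)
--     if n % 2 == 0:
--         return None
--     median_index = n // 2
--     return tmp[median_index]
--
-- def remove_median_from_array(arr):
--     median = find_median_value_from_array(arr)
--     if median is None:
--         return None, arr.copy()
--     tmp = arr.copy()
--     for i, x in enumerate(tmp):
--         if x == median:
--             del tmp[i]
--             break
--     return median, tmp
-- ===== SOURCE B (Python) =====
-- def remove_median_from_array(arr):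
--     n = len(arr)
--     if n == 0 or n % 2 == 0:
--         return None, list(arr)
--     k = n // 2
--     median = None
--     for x in arr:
--         less = 0
--         equal = 0
--         for y in arr:
--             if y < x:
--                 less += 1
--             elif y == x:
--                 equal += 1
--         if less <= k < less + equal:
--             median = x
--             break
--     i = arr.index(median)
--     return median, arr[:i] + arr[i + 1:]
-- ===== Notes on version B (the rewrite author's own statement) =====
-- stated objective: alternative
-- what changed: B replaces sort-then-index median selection with a counting-based selection (the median is the first element whose less-than/equal counts straddle n//2) and replaces the in-place delete loop with index-and-slice removal.
import Mathlib
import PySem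

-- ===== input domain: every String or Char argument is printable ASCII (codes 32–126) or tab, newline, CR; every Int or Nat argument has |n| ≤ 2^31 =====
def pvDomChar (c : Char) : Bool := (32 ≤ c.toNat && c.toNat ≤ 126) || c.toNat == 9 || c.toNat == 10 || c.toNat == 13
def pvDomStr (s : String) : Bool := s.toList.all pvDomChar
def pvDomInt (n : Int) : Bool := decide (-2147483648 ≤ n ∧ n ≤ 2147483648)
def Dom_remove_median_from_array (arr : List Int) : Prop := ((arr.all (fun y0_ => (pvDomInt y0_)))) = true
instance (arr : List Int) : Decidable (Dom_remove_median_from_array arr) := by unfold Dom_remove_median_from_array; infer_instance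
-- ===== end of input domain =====

-- B removes the first element equal to the median by a counting-based selection instead of sorting; alternative decomposition, no speed claim.

-- ===== PORT A =====
-- the 'for i, x in enumerate(tmp): if x == median: del tmp[i]; break' loop: remove the first occurrence
def pyDelFirst (median : Int) : List Int → List Int
  | [] => []
  | x :: rest => if x = median then rest else x :: pyDelFirst median rest

def find_median_value_from_array (arr : List Int) : Option Int :=
  let n := arr.length
  if n = 0 then none
  else
    let tmp := PySem.List.sorted arr (fun x => x) false
    if n % 2 = 0 then none
    else tmp[(n / 2)]?   -- index n//2 < n is always in range here

def remove_median_from_array (arr : List Int) : Option Int × List Int :=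
  match find_median_value_from_array arr with
  | none => (none, arr)
  | some median => (some median, pyDelFirst median arr)

-- ===== PORT B =====
-- the inner 'for y in arr' loop of Source B accumulating (less, equal)
def pvCounts (arr : List Int) (x : Int) : Nat × Nat :=
  arr.foldl (fun p y => if y < x then (p.1 + 1, p.2) else if y = x then (p.1, p.2 + 1) else p) (0, 0)

-- the test 'less <= k < less + equal'
def pvIsMedian (arr : List Int) (k : Nat) (x : Int) : Bool :=
  let p := pvCounts arr x
  decide (p.1 ≤ k ∧ k < p.1 + p.2)

def remove_median_from_array_alt (arr : List Int) : Option Int × List Int :=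
  let n := arr.length
  if n = 0 ∨ n % 2 = 0 then (none, arr)
  else
    -- the outer 'for x in arr: … break' loop = first element passing the test
    match arr.find? (pvIsMedian arr (n / 2)) with
    | none => (none, arr)      -- unreachable (a median always exists for odd n); Python would raise ValueError
    | some m =>
      match PySem.List.index? arr m with
      | none => (none, arr)    -- unreachable: m ∈ arr
      | some i => (some m, PySem.List.slice arr none (some (i : Int)) ++ PySem.List.slice arr (some ((i : Int) + 1)) none)

-- ===== PRECONDITION & SPEC =====
def Spec_remove_median_from_array (arr : List Int) (out : Option Int × List Int) : Prop := out = remove_median_from_array_alt arr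
instance (arr : List Int) (out : Option Int × List Int) : Decidable (Spec_remove_median_from_array arr out) := by unfold Spec_remove_median_from_array; infer_instance

-- ===== CLAIM (what is proved, stated in full; the proofs are below) =====
def Claim_equal_remove_median_from_array : Prop := ∀ (arr : List Int), Dom_remove_median_from_array arr → Spec_remove_median_from_array arr (remove_median_from_array arr)

-- ===== LEMMAS AND PROOFS =====

def cntLt (x : Int) (l : List Int) : Nat := l.countP (fun y => decide (y < x))
def cntEq (x : Int) (l : List Int) : Nat := l.countP (fun y => decide (y = x))

theorem pvCounts_aux (x : Int) (l : List Int) (p : Nat × Nat) :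
    l.foldl (fun p y => if y < x then (p.1 + 1, p.2) else if y = x then (p.1, p.2 + 1) else p) p
      = (p.1 + cntLt x l, p.2 + cntEq x l) := by
  induction l generalizing p with
  | nil => simp [cntLt, cntEq]
  | cons a l ih =>
    simp only [List.foldl_cons, ih, cntLt, cntEq, List.countP_cons]
    rcases lt_trichotomy a x with h | h | h
    · simp [h]; omega
    · subst h; simp; omega
    · simp [not_lt.mpr h.le, h.ne']

theorem pvCounts_eq (arr : List Int) (x : Int) :
    pvCounts arr x = (cntLt x arr, cntEq x arr) := by
  simp [pvCounts, pvCounts_aux]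

-- on a ≤-sorted list, the straddling condition pins down the k-th element
theorem sorted_get_of_counts (s : List Int) (hs : s.Pairwise (· ≤ ·)) (x : Int) (k : Nat)
    (hk : k < s.length) (h1 : cntLt x s ≤ k) (h2 : k < cntLt x s + cntEq x s) :
    s[k] = x := by
  induction s generalizing k with
  | nil => simp at hk
  | cons a l ih =>
    rw [List.pairwise_cons] at hs
    obtain ⟨ha, hl⟩ := hs
    simp only [cntLt, cntEq, List.countP_cons] at h1 h2
    rcases lt_trichotomy a x with h | h | h
    · have hne : a ≠ x := h.ne
      simp [h, hne] at h1 h2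
      have hk1 : 1 ≤ k := by omega
      obtain ⟨j, rfl⟩ : ∃ j, k = j + 1 := ⟨k - 1, by omega⟩
      simp only [List.getElem_cons_succ]
      exact ih hl j (by simpa using hk) (by unfold cntLt; omega)
        (by unfold cntLt cntEq; omega)
    · subst h
      have h0 : cntLt a l = 0 := by
        simp only [cntLt, List.countP_eq_zero]
        intro b hb
        simp [not_lt.mpr (ha b hb)]
      cases k with
      | zero => simp
      | succ j =>
        simp only [List.getElem_cons_succ]
        simp at h2
        refine ih hl j (by simpa using hk) (by unfold cntLt at h0 ⊢; omega) ?_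
        unfold cntLt at h0
        unfold cntLt cntEq
        omega
    · exfalso
      have h0 : cntLt x l = 0 := by
        simp only [cntLt, List.countP_eq_zero]
        intro b hb
        have := ha b hb; simp; omega
      have h0' : cntEq x l = 0 := by
        simp only [cntEq, List.countP_eq_zero]
        intro b hb
        have := ha b hb; simp; omega
      simp [not_lt.mpr h.le, h.ne'] at h2
      unfold cntLt at h0
      unfold cntEq at h0'
      omega

-- conversely the k-th element of a sorted list satisfies the straddling condition
theorem counts_of_sorted_get (s : List Int) (hs : s.Pairwise (· ≤ ·)) (k : Nat)
    (hk : k < s.length) (x : Int) (hx : s[k] = x) :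
    cntLt x s ≤ k ∧ k < cntLt x s + cntEq x s := by
  induction s generalizing k with
  | nil => simp at hk
  | cons a l ih =>
    rw [List.pairwise_cons] at hs
    obtain ⟨ha, hl⟩ := hs
    cases k with
    | zero =>
      simp only [List.getElem_cons_zero] at hx
      subst hx
      have h0 : cntLt a l = 0 := by
        simp only [cntLt, List.countP_eq_zero]
        intro b hb
        simp [not_lt.mpr (ha b hb)]
      simp only [cntLt, cntEq, List.countP_cons]
      unfold cntLt at h0
      simp
      omega
    | succ j =>
      have hj : j < l.length := by simpa using hk
      simp only [List.getElem_cons_succ] at hx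
      obtain ⟨ih1, ih2⟩ := ih hl j hj hx
      have hax : a ≤ x := hx ▸ ha _ (List.getElem_mem hj)
      simp only [cntLt, cntEq, List.countP_cons] at ih1 ih2 ⊢
      rcases eq_or_lt_of_le hax with h | h
      · subst h
        simp
        omega
      · simp [h, h.ne]
        omega

theorem find?_of_pred_iff (p : Int → Bool) (m : Int) (l : List Int)
    (hp : ∀ x, p x = true ↔ x = m) (hm : m ∈ l) : l.find? p = some m := by
  induction l with
  | nil => simp at hm
  | cons a t ih =>
    by_cases h : p a = true
    · rw [List.find?_cons_of_pos h, (hp a).mp h]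
    · have ham : a ≠ m := fun he => h ((hp a).mpr he)
      rw [List.find?_cons_of_neg h]
      rcases List.mem_cons.mp hm with h' | h'
      · exact absurd h'.symm ham
      · exact ih h' 

theorem pyDelFirst_eq_take_drop (m : Int) (arr : List Int) (i : Nat)
    (hi : PySem.List.index? arr m = some i) :
    pyDelFirst m arr = arr.take i ++ arr.drop (i + 1) := by
  induction arr generalizing i with
  | nil => simp [PySem.List.index?] at hi
  | cons x rest ih =>
    by_cases h : x = m
    · subst h
      rw [PySem.List.index?_cons_self] at hi
      cases hi
      simp [pyDelFirst]
    · rw [PySem.List.index?_cons_of_ne rest h] at hi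
      cases hq : PySem.List.index? rest m with
      | none => rw [hq] at hi; simp at hi
      | some j =>
        rw [hq] at hi
        simp only [Option.map_some, Option.some.injEq] at hi
        subst hi
        simp [pyDelFirst, h, ih j hq]

-- ===== VERDICT (by name: the statement is the Claim_ definition above) =====
theorem remove_median_from_array_spec : Claim_equal_remove_median_from_array := by
  intro arr _
  unfold Spec_remove_median_from_array
  by_cases h0 : arr.length = 0
  · simp [remove_median_from_array, remove_median_from_array_alt, find_median_value_from_array, h0]
  · by_cases h2 : arr.length % 2 = 0
    · simp [remove_median_from_array, remove_median_from_array_alt, find_median_value_from_array, h0, h2]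
    · -- odd length: a median exists
      set s := PySem.List.sorted arr (fun x => x) false with hs_def
      set k := arr.length / 2 with hk_def
      have hk : k < s.length := by
        rw [hs_def, PySem.List.length_sorted]
        omega
      have hsp : s.Pairwise (· ≤ ·) := by
        simpa using PySem.List.sorted_pairwise arr (fun x => x)
      have hperm : s.Perm arr := PySem.List.sorted_perm arr (fun x => x) false
      set m := s[k] with hm_def
      have hmem : m ∈ arr := hperm.subset (List.getElem_mem hk)
      have hcLt : ∀ x, cntLt x arr = cntLt x s := fun x => (hperm.countP_eq _).symm
      have hcEq : ∀ x, cntEq x arr = cntEq x s := fun x => (hperm.countP_eq _).symm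
      have hiff : ∀ x, pvIsMedian arr k x = true ↔ x = m := by
        intro x
        unfold pvIsMedian
        rw [pvCounts_eq]
        simp only [decide_eq_true_eq]
        constructor
        · rintro ⟨ha, hb⟩
          rw [hcLt, hcEq] at *
          exact (sorted_get_of_counts s hsp x k hk ha hb).symm
        · rintro rfl
          obtain ⟨ha, hb⟩ := counts_of_sorted_get s hsp k hk _ rfl
          rw [hcLt, hcEq]
          exact ⟨ha, hb⟩
      have hfind : arr.find? (pvIsMedian arr k) = some m :=
        find?_of_pred_iff _ m arr hiff hmem
      obtain ⟨i, hi⟩ : ∃ i, PySem.List.index? arr m = some i :=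
        Option.isSome_iff_exists.mp ((PySem.List.index?_isSome_iff arr m).mpr hmem)
      have hget : (PySem.List.sorted arr (fun x => x) false)[arr.length / 2]? = some m := by
        rw [hm_def]
        exact List.getElem?_eq_getElem hk
      have hA : remove_median_from_array arr = (some m, pyDelFirst m arr) := by
        unfold remove_median_from_array find_median_value_from_array
        simp only [h0, h2, if_false, hget]
      have hB : remove_median_from_array_alt arr =
          (some m, arr.take i ++ arr.drop (i + 1)) := by
        unfold remove_median_from_array_alt
        rw [if_neg (by omega : ¬(arr.length = 0 ∨ arr.length % 2 = 0))]
        simp only [← hk_def, hfind, hi]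
        rw [PySem.List.slice_to_natCast]
        have hcast : ((i : Int) + 1) = ((i + 1 : Nat) : Int) := by push_cast; ring
        rw [hcast, PySem.List.slice_from_natCast]
      rw [hA, hB, pyDelFirst_eq_take_drop m arr i hi]
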